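-- pv_equiv track=rewrite | github.com/trunova/python_basic | Module14/04_reverse_num/main.py | reversNumber
-- ===== SOURCE A (Python) =====
-- def reversNumber(N):
--     fractionalPart = '.'
--     wholePart = ''
--     i = len(N) - 1
--     while N[i] != '.':
--         fractionalPart += N[i]
--         i -= 1
--     i -= 1
--     while i != -1:
--         wholePart += N[i]
--         i -= 1
--     return wholePart + fractionalPart
-- ===== SOURCE B (Python) =====
-- def reversNumber(N):
--     wholePart, fractionalPart = N.rsplit('.', 1)
--     return wholePart[::-1] + '.' + fractionalPart[::-1]
-- ===== Notes on version B (the rewrite author's own statement) =====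
-- stated objective: idiomatic
-- what changed: B replaces A's two index-walking while-loops with per-character string concatenation by a single rsplit('.', 1) at the last dot followed by slice-reversal of the two parts.
import Mathlib
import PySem

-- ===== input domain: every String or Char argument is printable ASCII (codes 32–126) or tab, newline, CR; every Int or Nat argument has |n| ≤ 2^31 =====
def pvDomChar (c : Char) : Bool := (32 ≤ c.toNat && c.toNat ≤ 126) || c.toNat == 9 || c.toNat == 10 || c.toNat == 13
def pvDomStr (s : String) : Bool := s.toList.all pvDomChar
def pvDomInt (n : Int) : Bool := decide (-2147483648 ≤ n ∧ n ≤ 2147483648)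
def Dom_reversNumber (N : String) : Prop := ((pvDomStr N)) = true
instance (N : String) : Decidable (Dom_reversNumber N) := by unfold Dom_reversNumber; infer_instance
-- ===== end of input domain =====

-- B replaces A's two pointer-walking while-loops by rsplit('.', 1) + slice-reversal of the two parts (idiomatic decomposition).
-- ===== PORT A =====
-- first while loop: walk i down from len-1 collecting chars until a '.' is hit; 'none' from pyGet? models the IndexError (outside Pre_)
def pvLoop1 (cs : List Char) (i : Int) (acc : List Char) : List Char × Int :=
  match h : PySem.List.pyGet? cs i with
  | none => (acc, i)
  | some c =>
    if c = '.' then (acc, i)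
    else pvLoop1 cs (i - 1) (acc ++ [c])
termination_by (i + cs.length + 1).toNat
decreasing_by
  have hr : PySem.Raise.InRange cs.length i := by
    by_contra hc
    have hn := (PySem.List.pyGet?_eq_none_iff (xs := cs) (i := i)).mpr hc
    rw [hn] at h
    cases h
  simp only [PySem.Raise.InRange] at hr
  omega

-- second while loop: walk i down to -1 collecting chars; 'none' again models the IndexError
def pvLoop2 (cs : List Char) (i : Int) (acc : List Char) : List Char :=
  if i = -1 then acc
  else
    match h : PySem.List.pyGet? cs i with
    | none => acc
    | some c => pvLoop2 cs (i - 1) (acc ++ [c])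
termination_by (i + cs.length + 1).toNat
decreasing_by
  have hr : PySem.Raise.InRange cs.length i := by
    by_contra hc
    have hn := (PySem.List.pyGet?_eq_none_iff (xs := cs) (i := i)).mpr hc
    rw [hn] at h
    cases h
  simp only [PySem.Raise.InRange] at hr
  omega

def reversNumber (N : String) : String :=
  let cs := N.toList
  let r1 := pvLoop1 cs ((cs.length : Int) - 1) ['.']
  let fractionalPart := r1.1
  let i := r1.2 - 1
  let wholePart := pvLoop2 cs i []
  String.mk (wholePart ++ fractionalPart)

-- ===== PORT B =====
-- port of rsplit('.', 1): split the char list at its LAST '.'; none = no '.' (Python: ValueError, outside Pre_)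
def pvRsplitDot : List Char → Option (List Char × List Char)
  | [] => none
  | c :: rest =>
    match pvRsplitDot rest with
    | some (w, f) => some (c :: w, f)
    | none => if c = '.' then some ([], rest) else none

def reversNumber_alt (N : String) : String :=
  match pvRsplitDot N.toList with
  | some (w, f) => String.mk (w.reverse ++ '.' :: f.reverse)
  | none => ""

-- ===== PRECONDITION & SPEC =====
-- Pre_ excludes exactly the strings with no '.', on which A raises IndexError (and B raises ValueError).
def Pre_reversNumber (N : String) : Prop := '.' ∈ N.toList
instance (N : String) : Decidable (Pre_reversNumber N) := by unfold Pre_reversNumber; infer_instance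
def pvWitness_reversNumber : String := "12.34"
def Spec_reversNumber (N : String) (out : String) : Prop := out = reversNumber_alt N
instance (N : String) (out : String) : Decidable (Spec_reversNumber N out) := by unfold Spec_reversNumber; infer_instance

-- ===== CLAIM (what is proved, stated in full; the proofs are below) =====
def Claim_equal_reversNumber : Prop := ∀ (N : String), Dom_reversNumber N → Pre_reversNumber N → Spec_reversNumber N (reversNumber N)

-- ===== LEMMAS AND PROOFS =====

-- unfolding equations for the two loops (proof-only helpers)
theorem pvLoop1_some (cs : List Char) (i : Int) (acc : List Char) (c : Char)
    (h : PySem.List.pyGet? cs i = some c) :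
    pvLoop1 cs i acc = if c = '.' then (acc, i) else pvLoop1 cs (i - 1) (acc ++ [c]) := by
  rw [pvLoop1]
  split
  · next h' => rw [h] at h'; cases h'
  · next c' h' => rw [h] at h'; injection h' with hc; rw [hc]

theorem pvLoop2_neg_one (cs : List Char) (acc : List Char) : pvLoop2 cs (-1) acc = acc := by
  rw [pvLoop2]; simp

theorem pvLoop2_some (cs : List Char) (i : Int) (acc : List Char) (c : Char)
    (hne : i ≠ -1) (h : PySem.List.pyGet? cs i = some c) :
    pvLoop2 cs i acc = pvLoop2 cs (i - 1) (acc ++ [c]) := by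
  rw [pvLoop2, if_neg hne]
  split
  · next h' => rw [h] at h'; cases h'
  · next c' h' => rw [h] at h'; injection h' with hc; rw [hc]

theorem pvRsplitDot_some_mem (cs : List Char) (w f : List Char)
    (hx : pvRsplitDot cs = some (w, f)) : '.' ∈ cs := by
  induction cs generalizing w f with
  | nil => simp [pvRsplitDot] at hx
  | cons c rest ih =>
    simp only [pvRsplitDot] at hx
    cases hy : pvRsplitDot rest with
    | some q =>
      rw [hy] at hx
      exact List.mem_cons_of_mem _ (ih q.1 q.2 (by rw [hy]))
    | none =>
      rw [hy] at hx
      split_ifs at hx with hd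
      · exact hd ▸ List.mem_cons_self

-- rsplit characterization: if '.' occurs, pvRsplitDot splits at the LAST '.'
theorem pvRsplitDot_spec (cs : List Char) (h : '.' ∈ cs) :
    ∃ w f, pvRsplitDot cs = some (w, f) ∧ cs = w ++ '.' :: f ∧ '.' ∉ f := by
  induction cs with
  | nil => cases h
  | cons c rest ih =>
    by_cases hr : '.' ∈ rest
    · obtain ⟨w, f, h1, h2, h3⟩ := ih hr
      exact ⟨c :: w, f, by simp [pvRsplitDot, h1], by simp [h2], h3⟩
    · have hc : c = '.' := by
        rcases List.mem_cons.mp h with h' | h'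
        · exact h'.symm
        · exact absurd h' hr
      have hn : pvRsplitDot rest = none := by
        cases hx : pvRsplitDot rest with
        | none => rfl
        | some p => exact absurd (pvRsplitDot_some_mem rest p.1 p.2 (by rw [hx])) hr
      exact ⟨[], rest, by simp [pvRsplitDot, hn, hc], by simp [hc], hr⟩

-- loop1 collects the fractional part reversed and stops at the last dot
theorem pvLoop1_spec (w f : List Char) (hf : '.' ∉ f) (k : Nat) (hk : k ≤ f.length) (acc : List Char) :
    pvLoop1 (w ++ '.' :: f) ((w.length : Int) + k) acc = (acc ++ (f.take k).reverse, (w.length : Int)) := by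
  induction k generalizing acc with
  | zero =>
    push_cast
    have hg : PySem.List.pyGet? (w ++ '.' :: f) ((w.length : Int) + 0) = some '.' := by
      simpa using PySem.List.pyGet?_append_length (pre := w) (y := '.') (ys := f)
    rw [pvLoop1_some _ _ _ _ hg]
    simp
  | succ k ih =>
    push_cast
    have hlt : k < f.length := by omega
    have hg : PySem.List.pyGet? (w ++ '.' :: f) ((w.length : Int) + (k + 1)) = some f[k] := by
      have hcast : ((w.length : Int) + (k + 1)) = ((w.length + (k + 1) : Nat) : Int) := by push_cast; ring
      rw [hcast, PySem.List.pyGet?_natCast]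
      rw [List.getElem?_append_right (by omega)]
      simp [show w.length + (k + 1) - w.length = k + 1 by omega, hlt]
    have hne : f[k] ≠ '.' := fun hc => hf (hc ▸ List.getElem_mem hlt)
    rw [pvLoop1_some _ _ _ _ hg, if_neg hne]
    have harith : (w.length : Int) + (↑k + 1) - 1 = (w.length : Int) + k := by ring
    rw [harith, ih (by omega)]
    congr 1
    rw [List.take_succ, List.reverse_append]
    simp [hlt]

-- loop2 collects the first k chars reversed, walking k-1 down to -1
theorem pvLoop2_spec (cs : List Char) (k : Nat) (hk : k ≤ cs.length) (acc : List Char) :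
    pvLoop2 cs ((k : Int) - 1) acc = acc ++ (cs.take k).reverse := by
  induction k generalizing acc with
  | zero => simp [pvLoop2_neg_one]
  | succ k ih =>
    have hlt : k < cs.length := by omega
    have harith : ((k + 1 : Nat) : Int) - 1 = (k : Int) := by push_cast; ring
    have hg : PySem.List.pyGet? cs (k : Int) = some cs[k] := by
      rw [PySem.List.pyGet?_natCast]; simp [hlt]
    have hne : (k : Int) ≠ -1 := by omega
    rw [harith, pvLoop2_some cs (k : Int) acc cs[k] hne hg, ih (by omega)]
    rw [List.take_succ, List.reverse_append]
    simp [hlt]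

-- ===== VERDICT (by name: the statement is the Claim_ definition above) =====
theorem reversNumber_spec : Claim_equal_reversNumber := by
  intro N _ hpre
  obtain ⟨w, f, h1, h2, h3⟩ := pvRsplitDot_spec N.toList hpre
  unfold Spec_reversNumber reversNumber reversNumber_alt
  rw [h1]
  simp only [h2]
  have hlen : ((w ++ '.' :: f).length : Int) - 1 = (w.length : Int) + f.length := by
    push_cast; simp; ring
  rw [hlen, pvLoop1_spec w f h3 f.length le_rfl ['.']]
  rw [pvLoop2_spec (w ++ '.' :: f) w.length (by simp) []]
  simp [List.take_left']
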